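-- pv_equiv track=rewrite | github.com/volodkuzn/OIDN-python | src/oidn/__init__.py | _is_c_contiguous
-- ===== SOURCE A (Python) =====
-- def _expected_strides(shape: tuple[int, ...], itemsize: int) -> tuple[int, ...]:
--     stride = itemsize
--     expected: list[int] = []
--     for dim in reversed(shape):
--         expected.append(stride)
--         stride *= dim
--     return tuple(reversed(expected))
--
-- def _is_c_contiguous(
--     shape: tuple[int, ...],
--     strides: tuple[int, ...] | None,
--     itemsize: int,
-- ) -> bool:
--     if strides is None:
--         return True
--     if any(value < 0 for value in strides):
--         return False
--     return strides == _expected_strides(shape, itemsize)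
-- ===== SOURCE B (Python) =====
-- def _is_c_contiguous(shape, strides, itemsize):
--     if strides is None:
--         return True
--     if len(strides) != len(shape):
--         return False
--     if any(s < 0 for s in strides):
--         return False
--     if strides and strides[-1] != itemsize:
--         return False
--     return all(s0 == s1 * d1 for s0, s1, d1 in zip(strides, strides[1:], shape[1:]))
-- ===== Notes on version B (the rewrite author's own statement) =====
-- stated objective: alternative
-- what changed: Instead of computing the expected-strides table by a cumulative product and comparing tuples, B verifies the defining local recurrence: last stride equals itemsize and each stride equals the next stride times the next dimension, with no running product maintained anywhere.
import Mathlib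
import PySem

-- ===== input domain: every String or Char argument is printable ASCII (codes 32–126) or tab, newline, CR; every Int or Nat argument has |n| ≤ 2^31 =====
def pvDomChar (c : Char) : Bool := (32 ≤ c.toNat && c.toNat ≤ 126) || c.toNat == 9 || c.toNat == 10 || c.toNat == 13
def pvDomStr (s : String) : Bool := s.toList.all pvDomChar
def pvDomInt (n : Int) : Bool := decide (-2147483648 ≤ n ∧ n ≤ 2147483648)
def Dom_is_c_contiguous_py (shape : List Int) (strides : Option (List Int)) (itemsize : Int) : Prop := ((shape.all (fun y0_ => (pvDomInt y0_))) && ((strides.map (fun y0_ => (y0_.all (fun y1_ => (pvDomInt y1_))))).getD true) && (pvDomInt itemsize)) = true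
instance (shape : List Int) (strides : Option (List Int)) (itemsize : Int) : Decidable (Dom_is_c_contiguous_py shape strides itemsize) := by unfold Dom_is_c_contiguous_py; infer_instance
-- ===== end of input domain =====

-- B replaces A's cumulative-product expected-strides table with a check of the local recurrence
-- (last stride = itemsize, stride[i] = stride[i+1]*shape[i+1]); same cost, different algorithm.
-- ===== PORT A =====
-- helper _expected_strides: build the stride table over reversed(shape), then reverse it back
def expected_strides_py (shape : List Int) (itemsize : Int) : List Int :=
  let st := shape.reverse.foldl
    (fun (acc : List Int × Int) dim => (acc.1 ++ [acc.2], acc.2 * dim)) ([], itemsize)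
  st.1.reverse

def is_c_contiguous_py (shape : List Int) (strides : Option (List Int)) (itemsize : Int) : Bool :=
  match strides with
  | none => true
  | some st =>
    if st.any (fun v => decide (v < 0)) then false
    else st == expected_strides_py shape itemsize

-- ===== PORT B =====
-- literal port of Source B: length check, negativity check, `strides and strides[-1] != itemsize`
-- (strides[-1] for a nonempty list is its last element: List.getLastD under the nonemptiness
-- guard is exact), then all(...) over zip(strides, strides[1:], shape[1:]) — for a list,
-- xs[1:] is exactly List.drop 1, and the 3-way zip is the nested zip (both truncate alike).
def is_c_contiguous_py_alt (shape : List Int) (strides : Option (List Int)) (itemsize : Int) : Bool :=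
  match strides with
  | none => true
  | some st =>
    if st.length != shape.length then false
    else if st.any (fun s => decide (s < 0)) then false
    else if decide (st ≠ []) && (st.getLastD itemsize != itemsize) then false
    else ((st.zip (st.drop 1)).zip (shape.drop 1)).all (fun p => p.1.1 == p.1.2 * p.2)

-- ===== PRECONDITION & SPEC =====
def Spec_is_c_contiguous_py (shape : List Int) (strides : Option (List Int)) (itemsize : Int) (out : Bool) : Prop := out = is_c_contiguous_py_alt shape strides itemsize
instance (shape : List Int) (strides : Option (List Int)) (itemsize : Int) (out : Bool) : Decidable (Spec_is_c_contiguous_py shape strides itemsize out) := by unfold Spec_is_c_contiguous_py; infer_instance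

-- ===== CLAIM (what is proved, stated in full; the proofs are below) =====
def Claim_equal_is_c_contiguous_py : Prop := ∀ (shape : List Int) (strides : Option (List Int)) (itemsize : Int), Dom_is_c_contiguous_py shape strides itemsize → Spec_is_c_contiguous_py shape strides itemsize (is_c_contiguous_py shape strides itemsize)

-- ===== LEMMAS AND PROOFS =====

-- structural characterisation of the expected strides: entry i = itemsize * prod(shape[i+1:])
def esF : List Int → Int → List Int
  | [], _ => []
  | _ :: t, e => (e * t.prod) :: esF t e

theorem esF_length (l : List Int) (e : Int) : (esF l e).length = l.length := by
  induction l with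
  | nil => rfl
  | cons d t ih => simp [esF, ih]

theorem esF_append (L : List Int) (e d : Int) :
    esF (L ++ [d]) e = esF L (e * d) ++ [e] := by
  induction L with
  | nil => simp [esF]
  | cons c L ih =>
    simp only [List.cons_append, esF, ih, List.prod_append, List.prod_cons, List.prod_nil]
    have : e * (L.prod * (d * 1)) = e * d * L.prod := by ring
    rw [this]

-- A's foldl builds esRev: head-first expected strides of the reversed shape
def esRev : List Int → Int → List Int
  | [], _ => []
  | d :: t, e => e :: esRev t (e * d)

theorem foldl_es (l : List Int) (acc : List Int) (e : Int) :
    (l.foldl (fun (a : List Int × Int) dim => (a.1 ++ [a.2], a.2 * dim)) (acc, e)).1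
      = acc ++ esRev l e := by
  induction l generalizing acc e with
  | nil => simp [esRev]
  | cons d t ih => simp [List.foldl, esRev, ih]

theorem esRev_reverse (l : List Int) (e : Int) :
    (esRev l e).reverse = esF l.reverse e := by
  induction l generalizing e with
  | nil => rfl
  | cons d t ih =>
    simp only [esRev, List.reverse_cons, ih, esF_append]

theorem expected_strides_eq (shape : List Int) (e : Int) :
    expected_strides_py shape e = esF shape e := by
  show ((shape.reverse.foldl (fun (a : List Int × Int) dim => (a.1 ++ [a.2], a.2 * dim)) ([], e)).1).reverse = _
  rw [foldl_es, List.nil_append, esRev_reverse, List.reverse_reverse]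

-- the recurrence check equals equality with the expected table (for equal lengths)
theorem char_lemma (shape : List Int) (e : Int) : ∀ (st : List Int), st.length = shape.length →
    (st == esF shape e)
      = ((!(decide (st ≠ []) && (st.getLastD e != e)))
          && ((st.zip (st.drop 1)).zip (shape.drop 1)).all (fun p => p.1.1 == p.1.2 * p.2)) := by
  induction shape with
  | nil =>
    intro st h
    have : st = [] := List.length_eq_zero_iff.mp h
    subst this; rfl
  | cons d0 sh ih =>
    intro st h
    cases st with
    | nil => simp at h
    | cons s0 st' =>
      cases sh with
      | nil =>
        have : st' = [] := List.length_eq_zero_iff.mp (by simpa using h)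
        subst this
        simp [esF, List.getLastD, bne]
      | cons d1 sh' =>
        cases st' with
        | nil => simp at h
        | cons s1 st'' =>
          have ih' := ih (s1 :: st'') (by simpa using h)
          simp only [esF, List.prod_cons, List.cons_beq_cons, List.drop_succ_cons,
            List.drop_zero, List.zip_cons_cons, List.all_cons] at ih' ⊢
          have hne : decide ((s0 :: s1 :: st'' : List Int) ≠ []) = true := by simp
          have hne2 : decide ((s1 :: st'' : List Int) ≠ []) = true := by simp
          have hlast : (s0 :: s1 :: st'' : List Int).getLastD e = (s1 :: st'').getLastD e := by
            simp [List.getLastD]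
          rw [hne2] at ih'
          rw [hne, hlast]
          simp only [Bool.true_and] at ih' ⊢
          rw [ih']
          by_cases hL : (!((s1 :: st'' : List Int).getLastD e != e)) = true
          · by_cases hZ : (((s1 :: st'').zip st'').zip sh').all (fun p => p.1.1 == p.1.2 * p.2) = true
            · have hE : (s1 == e * sh'.prod && st'' == esF sh' e) = true := by
                rw [ih', hL, hZ]
                rfl
              rw [Bool.and_eq_true, beq_iff_eq] at hE
              have hA : (s0 == e * (d1 * sh'.prod)) = (s0 == s1 * d1) := by
                rw [hE.1]; congr 1; ring
              rw [hA, hL, hZ]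
              rfl
            · have hZ' : (((s1 :: st'').zip st'').zip sh').all (fun p => p.1.1 == p.1.2 * p.2) = false :=
                Bool.eq_false_iff.mpr hZ
              rw [hZ']
              simp
          · have hL' : (!((s1 :: st'' : List Int).getLastD e != e)) = false :=
              Bool.eq_false_iff.mpr hL
            rw [hL']
            simp

theorem ports_agree (shape : List Int) (strides : Option (List Int)) (itemsize : Int) :
    is_c_contiguous_py shape strides itemsize = is_c_contiguous_py_alt shape strides itemsize := by
  cases strides with
  | none => rfl
  | some st =>
    simp only [is_c_contiguous_py, is_c_contiguous_py_alt, expected_strides_eq]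
    by_cases hl : st.length = shape.length
    · have hbne : (st.length != shape.length) = false := by simp [hl]
      rw [hbne]
      simp only [Bool.false_eq_true, if_false]
      by_cases hn : st.any (fun v => decide (v < 0)) = true
      · simp [hn]
      · have hn' : st.any (fun v => decide (v < 0)) = false := Bool.eq_false_iff.mpr hn
        rw [hn']
        simp only [Bool.false_eq_true, if_false]
        rw [char_lemma shape itemsize st hl]
        cases hb : (decide (st ≠ []) && (st.getLastD itemsize != itemsize)) <;> simp
    · have hbne : (st.length != shape.length) = true := by simpa using hl
      rw [hbne]
      simp only [if_true]
      have hne : (st == esF shape itemsize) = false := by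
        rw [beq_eq_false_iff_ne]
        intro h
        exact hl (by rw [h, esF_length])
      by_cases hn : st.any (fun v => decide (v < 0)) = true
      · simp [hn]
      · have hn' : st.any (fun v => decide (v < 0)) = false := Bool.eq_false_iff.mpr hn
        simp [hn', hne]

-- ===== VERDICT (by name: the statement is the Claim_ definition above) =====
theorem is_c_contiguous_py_spec : Claim_equal_is_c_contiguous_py := by
  intro shape strides itemsize _
  exact ports_agree shape strides itemsize
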